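-- pv_equiv track=rewrite | github.com/YelamanKarassay/Assignment_drafts | main.py | exercise_18
-- ===== SOURCE A (Python) =====
-- def exercise_18(n):
--     a = 0
--     arr_1 = []
--     while n > a:
--         b = 1
--         arr_2 = []
--         while n > b:
--             arr_2.append(n)
--             b *= 2
--         arr_1.append(arr_2)
--         a += 1
--     return arr_1
-- ===== SOURCE B (Python) =====
-- def exercise_18(n):
--     k = (n - 1).bit_length() if n > 0 else 0
--     return [[n] * k for _ in range(n)]
-- ===== Notes on version B (the rewrite author's own statement) =====
-- stated objective: simpler
-- what changed: Replaces the nested doubling while-loops by a closed-form row length k=(n-1).bit_length() and a flat comprehension of replicated rows.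
import Mathlib
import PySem

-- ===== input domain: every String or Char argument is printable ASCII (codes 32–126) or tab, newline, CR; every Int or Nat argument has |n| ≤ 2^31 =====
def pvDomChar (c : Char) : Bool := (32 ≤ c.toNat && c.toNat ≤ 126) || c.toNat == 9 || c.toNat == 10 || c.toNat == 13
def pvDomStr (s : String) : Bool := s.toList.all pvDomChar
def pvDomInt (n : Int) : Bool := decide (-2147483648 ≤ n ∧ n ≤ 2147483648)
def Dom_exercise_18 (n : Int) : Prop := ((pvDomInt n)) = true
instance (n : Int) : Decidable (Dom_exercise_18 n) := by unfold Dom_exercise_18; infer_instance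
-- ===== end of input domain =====

-- B computes the inner row length in closed form ((n-1).bit_length()) instead of A's doubling loop; objective: simpler.

-- ===== PORT A =====
-- inner while loop: b starts at 1 and doubles, so b ≥ 1 is an invariant; it is
-- carried as a hypothesis only to justify termination of the literal loop.
def exercise_18_inner (n b : Int) (hb : 1 ≤ b) : List Int :=
  if h : n > b then n :: exercise_18_inner n (2 * b) (by omega) else []
termination_by (n - b).toNat
decreasing_by omega

def exercise_18_outer (n a : Int) (arr1 : List (List Int)) : List (List Int) :=
  if h : n > a then exercise_18_outer n (a + 1) (arr1 ++ [exercise_18_inner n 1 (by omega)]) else arr1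
termination_by (n - a).toNat
decreasing_by omega

def exercise_18 (n : Int) : List (List Int) :=
  exercise_18_outer n 0 []

-- ===== PORT B =====
-- int.bit_length() for a nonnegative integer (exact on that domain)
def pvBitLen (m : Nat) : Nat :=
  if m = 0 then 0 else pvBitLen (m / 2) + 1

def exercise_18_alt (n : Int) : List (List Int) :=
  let k : Nat := if n > 0 then pvBitLen (n - 1).toNat else 0
  (PySem.List.pyRange 0 n 1).map (fun _ => List.replicate k n)

-- ===== PRECONDITION & SPEC =====
def Spec_exercise_18 (n : Int) (out : List (List Int)) : Prop := out = exercise_18_alt n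
instance (n : Int) (out : List (List Int)) : Decidable (Spec_exercise_18 n out) := by unfold Spec_exercise_18; infer_instance

-- ===== CLAIM (what is proved, stated in full; the proofs are below) =====
def Claim_equal_exercise_18 : Prop := ∀ (n : Int), Dom_exercise_18 n → Spec_exercise_18 n (exercise_18 n)

-- ===== LEMMAS AND PROOFS =====

-- The inner loop from b produces (n-1).toNat / b.toNat many copies of n, counted in bits.
theorem exercise_18_inner_eq (n b : Int) (hb : 1 ≤ b) :
    exercise_18_inner n b hb = List.replicate (pvBitLen ((n - 1).toNat / b.toNat)) n := by
  induction b, hb using exercise_18_inner.induct (n := n) with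
  | case1 b hb h ih =>
      rw [exercise_18_inner, dif_pos h, ih]
      have hbn : b.toNat ≠ 0 := by omega
      have hq : (n - 1).toNat / b.toNat ≠ 0 := by
        have : b.toNat ≤ (n - 1).toNat := by omega
        exact Nat.ne_of_gt (Nat.div_pos this (by omega))
      have h2 : (2 * b).toNat = b.toNat * 2 := by omega
      rw [h2, ← Nat.div_div_eq_div_mul]
      conv_rhs => rw [pvBitLen, if_neg hq]
      rfl
  | case2 b hb h =>
      rw [exercise_18_inner, dif_neg h]
      have : (n - 1).toNat / b.toNat = 0 := Nat.div_eq_of_lt (by omega)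
      rw [this, pvBitLen]
      simp

theorem exercise_18_outer_eq (n a : Int) (arr1 : List (List Int)) :
    exercise_18_outer n a arr1 =
      arr1 ++ List.replicate (n - a).toNat (exercise_18_inner n 1 (by omega)) := by
  induction a, arr1 using exercise_18_outer.induct (n := n) with
  | case1 a arr1 h ih =>
      rw [exercise_18_outer, dif_pos h, ih]
      have : (n - a).toNat = (n - (a + 1)).toNat + 1 := by omega
      rw [this, List.replicate_succ, List.append_assoc]
      rfl
  | case2 a arr1 h =>
      rw [exercise_18_outer, dif_neg h]
      have : (n - a).toNat = 0 := by omega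
      simp [this]

-- ===== VERDICT (by name: the statement is the Claim_ definition above) =====
theorem exercise_18_spec : Claim_equal_exercise_18 := by
  intro n _
  unfold Spec_exercise_18 exercise_18 exercise_18_alt
  rw [exercise_18_outer_eq, exercise_18_inner_eq]
  simp only [List.nil_append, Int.toNat_one, Nat.div_one, Int.sub_zero]
  rw [PySem.List.pyRange_one]
  by_cases hn : n > 0
  · simp [if_pos hn, Function.comp_def, List.map_const', List.length_range]
  · simp [if_neg hn, show n.toNat = 0 by omega]
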